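-- pv_equiv track=rewrite | github.com/Songkrankaektes13/python-INE68 | lecture-07/hw_02.py | longest_unique_word_sequence
-- ===== SOURCE A (Python) =====
-- def longest_unique_word_sequence(words: list[list[str]]) -> tuple:
--     flat_words = [w for sublist in words for w in sublist]
--     n = len(flat_words)
--     max_len = 0
--     max_sequences = []
--
--     for i in range(n):
--         seen = set()
--         sequence = []
--         for j in range(i, n):
--             if flat_words[j] in seen:
--                 break
--             seen.add(flat_words[j])
--             sequence.append(flat_words[j])
--         if len(sequence) > max_len:
--             max_len = len(sequence)
--             max_sequences = [sequence.copy()]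
--         elif len(sequence) == max_len and len(sequence) > 0:
--             max_sequences.append(sequence.copy())
--
--     return max_len, max_sequences
-- ===== SOURCE B (Python) =====
-- def longest_unique_word_sequence(words: list[list[str]]) -> tuple:
--     # One backward pass: run[i] = length of the longest duplicate-free prefix
--     # starting at i, via run[i] = 1 + min(run[i+1], next_occurrence(flat[i]) - i - 1).
--     flat = [w for sublist in words for w in sublist]
--     n = len(flat)
--     nxt = {}
--     prev = 0
--     runs = []
--     for i in range(n - 1, -1, -1):
--         j = nxt.get(flat[i], n)
--         prev = 1 + min(prev, j - i - 1)
--         nxt[flat[i]] = i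
--         runs.append(prev)
--     runs.reverse()
--     m = max(runs) if runs else 0
--     seqs = [flat[i:i + m] for i in range(n) if runs[i] == m] if m > 0 else []
--     return m, seqs
-- ===== Notes on version B (the rewrite author's own statement) =====
-- stated objective: faster
-- what changed: Replaces A's per-start rescan with a fresh set (quadratic) by one backward pass that keeps a next-occurrence dictionary and computes every maximal unique-run length via run[i] = 1 + min(run[i+1], next[w] - i - 1), then collects the maximal runs as slices.
import Mathlib
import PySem

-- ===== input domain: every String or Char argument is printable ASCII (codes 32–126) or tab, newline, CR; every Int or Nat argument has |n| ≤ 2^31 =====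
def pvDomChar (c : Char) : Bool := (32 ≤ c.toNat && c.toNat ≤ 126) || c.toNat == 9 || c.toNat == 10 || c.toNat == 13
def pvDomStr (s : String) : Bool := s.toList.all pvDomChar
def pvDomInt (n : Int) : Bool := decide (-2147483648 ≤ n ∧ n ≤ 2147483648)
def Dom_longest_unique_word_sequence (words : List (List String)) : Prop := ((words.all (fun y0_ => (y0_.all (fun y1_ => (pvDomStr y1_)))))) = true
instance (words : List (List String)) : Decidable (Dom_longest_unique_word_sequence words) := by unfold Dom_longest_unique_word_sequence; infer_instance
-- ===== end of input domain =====

-- B replaces A's quadratic restart-a-scan-per-start algorithm by a single backward pass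
-- with a next-occurrence dictionary (run[i] = 1 + min(run[i+1], next[flat[i]] - i - 1)).

-- ===== PORT A =====
-- inner 'for j in range(i, n): … break …' loop of A
def pvA_scan (flat : List String) : List Int → PySem.Set String → List String → PySem.Set String × List String
  | [], seen, sequence => (seen, sequence)
  | j :: js, seen, sequence =>
    let w := PySem.List.pyGetD flat j ""
    if PySem.Set.contains seen w then (seen, sequence)
    else pvA_scan flat js (PySem.Set.add seen w) (sequence ++ [w])

def longest_unique_word_sequence (words : List (List String)) : Int × List (List String) :=
  let flat_words := words.flatMap (fun sublist => sublist)
  let n := PySem.List.len flat_words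
  (PySem.List.pyRange 0 n 1).foldl (fun (st : Int × List (List String)) i =>
      let sequence := (pvA_scan flat_words (PySem.List.pyRange i n 1) PySem.Set.empty []).2
      if PySem.List.len sequence > st.1 then (PySem.List.len sequence, [sequence])
      else if PySem.List.len sequence = st.1 ∧ PySem.List.len sequence > 0 then (st.1, st.2 ++ [sequence])
      else st)
    ((0 : Int), ([] : List (List String)))

-- ===== PORT B =====
def longest_unique_word_sequence_alt (words : List (List String)) : Int × List (List String) :=
  let flat := words.flatMap (fun sublist => sublist)
  let n := PySem.List.len flat
  let st := (PySem.List.pyRange (n - 1) (-1) (-1)).foldl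
    (fun (st : PySem.Dict String Int × Int × List Int) i =>
      let w := PySem.List.pyGetD flat i ""
      let j := PySem.Dict.getD st.1 w n
      let prev := 1 + min st.2.1 (j - i - 1)
      (PySem.Dict.insert st.1 w i, prev, st.2.2 ++ [prev]))
    (PySem.Dict.empty, (0 : Int), ([] : List Int))
  let runs := st.2.2.reverse
  let m : Int := if runs = [] then 0 else (PySem.List.max? runs (fun x => x)).getD 0
  let seqs := if m > 0 then
      ((PySem.List.pyRange 0 n 1).filter (fun i => PySem.List.pyGetD runs i 0 == m)).map
        (fun i => PySem.List.slice flat (some i) (some (i + m)))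
    else []
  (m, seqs)

-- ===== PRECONDITION & SPEC =====
def Spec_longest_unique_word_sequence (words : List (List String)) (out : Int × List (List String)) : Prop := out = longest_unique_word_sequence_alt words
instance (words : List (List String)) (out : Int × List (List String)) : Decidable (Spec_longest_unique_word_sequence words out) := by unfold Spec_longest_unique_word_sequence; infer_instance

-- ===== CLAIM (what is proved, stated in full; the proofs are below) =====
def Claim_equal_longest_unique_word_sequence : Prop := ∀ (words : List (List String)), Dom_longest_unique_word_sequence words → Spec_longest_unique_word_sequence words (longest_unique_word_sequence words)

-- ===== LEMMAS AND PROOFS =====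

-- greedy duplicate-free prefix of l, skipping nothing, stopping at the first word already in `seen`
def pvTk (seen : PySem.Set String) : List String → List String
  | [] => []
  | x :: xs => if PySem.Set.contains seen x then [] else x :: pvTk (PySem.Set.add seen x) xs

lemma pvTk_cons_of_mem (s : PySem.Set String) (x : String) (xs : List String) (h : x ∈ s) :
    pvTk s (x :: xs) = [] := by
  simp only [pvTk, (PySem.Set.contains_iff s x).2 h, if_true]

lemma pvTk_cons_of_not_mem (s : PySem.Set String) (x : String) (xs : List String) (h : x ∉ s) :
    pvTk s (x :: xs) = x :: pvTk (PySem.Set.add s x) xs := by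
  have hc : PySem.Set.contains s x = false := by
    simp only [Bool.eq_false_iff, ne_eq, PySem.Set.contains_iff]; exact h
  simp only [pvTk, hc, Bool.false_eq_true, if_false]

lemma pvTk_congr (l : List String) : ∀ (s₁ s₂ : PySem.Set String), (∀ z, z ∈ s₁ ↔ z ∈ s₂) → pvTk s₁ l = pvTk s₂ l := by
  induction l with
  | nil => intro s₁ s₂ h; rfl
  | cons x xs ih =>
    intro s₁ s₂ h
    by_cases hx : x ∈ s₁
    · rw [pvTk_cons_of_mem _ _ _ hx, pvTk_cons_of_mem _ _ _ ((h x).1 hx)]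
    · rw [pvTk_cons_of_not_mem _ _ _ hx, pvTk_cons_of_not_mem _ _ _ (fun hm => hx ((h x).2 hm)),
        ih (PySem.Set.add s₁ x) (PySem.Set.add s₂ x) (by intro z; simp only [PySem.Set.mem_add, h z])]

lemma pvTk_add_len (l : List String) : ∀ (s : PySem.Set String) (x : String), x ∉ s →
    (pvTk (PySem.Set.add s x) l).length = min (pvTk s l).length (l.idxOf x) := by
  induction l with
  | nil => intro s x hx; simp [pvTk]
  | cons y ys ih =>
    intro s x hx
    by_cases hy : y ∈ s
    · rw [pvTk_cons_of_mem _ _ _ hy,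
        pvTk_cons_of_mem _ _ _ ((PySem.Set.mem_add _ _ _).2 (Or.inl hy))]
      simp
    · by_cases hyx : y = x
      · subst hyx
        rw [pvTk_cons_of_mem _ _ _ ((PySem.Set.mem_add _ _ _).2 (Or.inr rfl)),
          pvTk_cons_of_not_mem _ _ _ hy, List.idxOf_cons_self]
        simp
      · have hx2 : x ∉ PySem.Set.add s y := by
          intro hm
          rcases (PySem.Set.mem_add _ _ _).1 hm with h | h
          · exact hx h
          · exact hyx h.symm
        have hyax : y ∉ PySem.Set.add s x := by
          intro hm
          rcases (PySem.Set.mem_add _ _ _).1 hm with h | h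
          · exact hy h
          · exact hyx h
        have hcomm : pvTk (PySem.Set.add (PySem.Set.add s x) y) ys
            = pvTk (PySem.Set.add (PySem.Set.add s y) x) ys := by
          apply pvTk_congr
          intro z; simp only [PySem.Set.mem_add]; tauto
        have hbeq : (y == x) = false := beq_eq_false_iff_ne.mpr hyx
        have hidx : (y :: ys).idxOf x = ys.idxOf x + 1 := by
          simp [List.idxOf_cons, hbeq]
        rw [pvTk_cons_of_not_mem _ _ _ hyax, pvTk_cons_of_not_mem _ _ _ hy,
          List.length_cons, List.length_cons, hcomm, ih _ _ hx2, hidx]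
        omega

lemma pvTk_cons_len (x : String) (xs : List String) :
    (pvTk PySem.Set.empty (x :: xs)).length = 1 + min (pvTk PySem.Set.empty xs).length (xs.idxOf x) := by
  rw [pvTk_cons_of_not_mem _ _ _ (by simp [PySem.Set.empty]), List.length_cons,
    pvTk_add_len xs PySem.Set.empty x (by simp [PySem.Set.empty])]
  omega

lemma pvTk_take (l : List String) : ∀ s, pvTk s l = l.take (pvTk s l).length := by
  induction l with
  | nil => intro s; rfl
  | cons x xs ih =>
    intro s
    by_cases hx : x ∈ s
    · rw [pvTk_cons_of_mem _ _ _ hx]; rfl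
    · rw [pvTk_cons_of_not_mem _ _ _ hx]
      simp only [List.length_cons, List.take_succ_cons]
      rw [← ih]

-- the value A's inner loop produces for start index i
def pvSeqAt (flat : List String) (i : Nat) : List String := pvTk PySem.Set.empty (flat.drop i)

def pvVals (flat : List String) : List (List String) := (List.range flat.length).map (pvSeqAt flat)

def pvMx (flat : List String) : Nat := (pvVals flat).foldl (fun a s => max a s.length) 0

-- A's outer-loop body, named (definitionally the lambda in port A)
def pvAStep (flat : List String) (nn : Int) (st : Int × List (List String)) (i : Int) : Int × List (List String) :=
  let sequence := (pvA_scan flat (PySem.List.pyRange i nn 1) PySem.Set.empty []).2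
  if PySem.List.len sequence > st.1 then (PySem.List.len sequence, [sequence])
  else if PySem.List.len sequence = st.1 ∧ PySem.List.len sequence > 0 then (st.1, st.2 ++ [sequence])
  else st

-- the same update with the already-computed sequence as argument
def pvStep (st : Int × List (List String)) (sequence : List String) : Int × List (List String) :=
  if PySem.List.len sequence > st.1 then (PySem.List.len sequence, [sequence])
  else if PySem.List.len sequence = st.1 ∧ PySem.List.len sequence > 0 then (st.1, st.2 ++ [sequence])
  else st

-- B's loop body, named (definitionally the lambda in port B)
def pvBStep (flat : List String) (nn : Int) (st : PySem.Dict String Int × Int × List Int) (i : Int) :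
    PySem.Dict String Int × Int × List Int :=
  let w := PySem.List.pyGetD flat i ""
  let j := PySem.Dict.getD st.1 w nn
  let prev := 1 + min st.2.1 (j - i - 1)
  (PySem.Dict.insert st.1 w i, prev, st.2.2 ++ [prev])

def pvAF (flat : List String) : Int × List (List String) :=
  let n := PySem.List.len flat
  (PySem.List.pyRange 0 n 1).foldl (pvAStep flat n) ((0 : Int), ([] : List (List String)))

def pvBF (flat : List String) : Int × List (List String) :=
  let n := PySem.List.len flat
  let st := (PySem.List.pyRange (n - 1) (-1) (-1)).foldl (pvBStep flat n)
    (PySem.Dict.empty, (0 : Int), ([] : List Int))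
  let runs := st.2.2.reverse
  let m : Int := if runs = [] then 0 else (PySem.List.max? runs (fun x => x)).getD 0
  let seqs := if m > 0 then
      ((PySem.List.pyRange 0 n 1).filter (fun i => PySem.List.pyGetD runs i 0 == m)).map
        (fun i => PySem.List.slice flat (some i) (some (i + m)))
    else []
  (m, seqs)

lemma pvA_scan_eq (flat : List String) : ∀ (d k : Nat) (seen : PySem.Set String) (seq : List String),
    flat.length - k ≤ d →
    (pvA_scan flat (PySem.List.pyRange (k : Int) (flat.length : Int) 1) seen seq).2 = seq ++ pvTk seen (flat.drop k) := by
  intro d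
  induction d with
  | zero =>
    intro k seen seq h
    have hk : flat.length ≤ k := by omega
    rw [PySem.List.pyRange_one_eq_nil (by exact_mod_cast hk), List.drop_eq_nil_of_le hk]
    simp [pvA_scan, pvTk]
  | succ d ih =>
    intro k seen seq h
    by_cases hk : k < flat.length
    · rw [PySem.List.pyRange_one_cons (by exact_mod_cast hk)]
      have hget : PySem.List.pyGetD flat (k : Int) "" = flat[k] := by
        rw [PySem.List.pyGetD_natCast]
        exact List.getD_eq_getElem flat "" hk
      have hdrop : flat.drop k = flat[k] :: flat.drop (k + 1) := (List.getElem_cons_drop (as := flat) (h := hk)).symm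
      simp only [pvA_scan, hget]
      rw [hdrop]
      simp only [pvTk]
      split
      · simp
      · have hcast : (k : Int) + 1 = ((k + 1 : Nat) : Int) := by push_cast; ring
        rw [hcast, ih (k + 1) _ _ (by omega)]
        simp
    · have hk' : flat.length ≤ k := by omega
      rw [PySem.List.pyRange_one_eq_nil (by exact_mod_cast hk'), List.drop_eq_nil_of_le hk']
      simp [pvA_scan, pvTk]

lemma pvAStep_eq (flat : List String) (st : Int × List (List String)) (i : Nat) :
    pvAStep flat (flat.length : Int) st (i : Int) = pvStep st (pvSeqAt flat i) := by
  unfold pvAStep pvStep pvSeqAt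
  rw [pvA_scan_eq flat flat.length i PySem.Set.empty [] (by omega), List.nil_append]

lemma pvSeqAt_pos (flat : List String) (i : Nat) (hi : i < flat.length) :
    1 ≤ (pvSeqAt flat i).length := by
  have hne : flat.drop i ≠ [] := by
    intro h
    have := List.drop_eq_nil_iff.1 h
    omega
  obtain ⟨x, xs, hx⟩ := List.exists_cons_of_ne_nil hne
  unfold pvSeqAt
  rw [hx, pvTk_cons_of_not_mem _ _ _ (by simp [PySem.Set.empty])]
  simp

lemma pvVals_ne (flat : List String) : ∀ s ∈ pvVals flat, s ≠ [] := by
  intro s hs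
  simp only [pvVals, List.mem_map, List.mem_range] at hs
  obtain ⟨i, hi, rfl⟩ := hs
  have := pvSeqAt_pos flat i hi
  intro h
  rw [h] at this
  simp at this

lemma pvAgg : ∀ (vals : List (List String)), (∀ s ∈ vals, s ≠ []) →
    vals.foldl pvStep ((0 : Int), ([] : List (List String)))
      = (((vals.foldl (fun a s => max a s.length) 0 : Nat) : Int),
          vals.filter (fun s => s.length == vals.foldl (fun a s => max a s.length) 0)) := by
  intro vals
  induction vals using List.reverseRecOn with
  | nil => intro _; simp
  | append_singleton vs s ih =>
    intro hne
    have hub := (PySem.List.le_foldl_max_nat vs List.length 0).2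
    have hs0 : 0 < s.length := by
      have := hne s (by simp)
      cases s with
      | nil => simp at this
      | cons a as => simp
    rw [List.foldl_append, List.foldl_append,
      ih (fun t ht => hne t (List.mem_append_left _ ht))]
    simp only [List.foldl_cons, List.foldl_nil]
    set M := vs.foldl (fun a s => max a s.length) 0 with hM
    rcases Nat.lt_trichotomy M s.length with h | h | h
    · rw [pvStep]
      rw [if_pos (by simp only [PySem.List.len_eq]; exact_mod_cast h)]
      have hmax : max M s.length = s.length := Nat.max_eq_right h.le
      rw [hmax, List.filter_append]
      have hnilf : vs.filter (fun t => t.length == s.length) = [] := by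
        rw [List.filter_eq_nil_iff]
        intro t ht
        have := hub t ht
        simp only [beq_iff_eq]
        omega
      rw [hnilf]
      simp [PySem.List.len_eq]
    · rw [pvStep]
      rw [if_neg (by simp only [PySem.List.len_eq]; omega)]
      rw [if_pos (show _ ∧ _ from ⟨by simp only [PySem.List.len_eq]; exact_mod_cast h.symm,
        by simp only [PySem.List.len_eq]; exact_mod_cast hs0⟩)]
      have hmax : max M s.length = M := by omega
      rw [hmax, List.filter_append]
      have : List.filter (fun t => t.length == M) [s] = [s] := by
        simp [h]
      rw [this]
    · rw [pvStep]
      rw [if_neg (by simp only [PySem.List.len_eq]; omega)]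
      rw [if_neg (by simp only [PySem.List.len_eq]; omega)]
      have hmax : max M s.length = M := by omega
      rw [hmax, List.filter_append]
      have : List.filter (fun t => t.length == M) [s] = [] := by
        simp [beq_iff_eq]; omega
      rw [this, List.append_nil]

lemma pvA_norm (flat : List String) :
    pvAF flat = (((pvMx flat : Nat) : Int), (pvVals flat).filter (fun s => s.length == pvMx flat)) := by
  simp only [pvAF, PySem.List.len_eq]
  rw [PySem.List.pyRange_zero_nat, List.foldl_map]
  have hcongr : (List.range flat.length).foldl
      (fun (x : Int × List (List String)) (y : Nat) => pvAStep flat ((flat.length : Nat) : Int) x ((y : Nat) : Int))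
      ((0 : Int), ([] : List (List String)))
      = (List.range flat.length).foldl (fun st i => pvStep st (pvSeqAt flat i))
        ((0 : Int), ([] : List (List String))) :=
    PySem.List.foldl_congr_mem _ _ _ _ (fun st i _ => pvAStep_eq flat st i)
  rw [hcongr]
  rw [← List.foldl_map (f := pvSeqAt flat) (g := pvStep)]
  rw [show (List.range flat.length).map (pvSeqAt flat) = pvVals flat from rfl]
  rw [pvAgg (pvVals flat) (pvVals_ne flat)]
  rfl

lemma pvB_fold (flat : List String) : ∀ (m : Nat), m ≤ flat.length →
    ∀ (d : PySem.Dict String Int) (p : Int) (r : List Int),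
    (∀ w : String, PySem.Dict.getD d w (flat.length : Int) = (m : Int) + (((flat.drop m).idxOf w : Nat) : Int)) →
    p = ((pvTk PySem.Set.empty (flat.drop m)).length : Int) →
    ((PySem.List.pyRange ((m : Int) - 1) (-1) (-1)).foldl (pvBStep flat (flat.length : Int)) (d, p, r)).2.2
      = r ++ ((List.range m).reverse.map (fun i => ((pvTk PySem.Set.empty (flat.drop i)).length : Int))) := by
  intro m
  induction m with
  | zero =>
    intro _ d p r _ _
    rw [PySem.List.pyRange_neg_one_eq_nil (by norm_num)]
    simp
  | succ m ih =>
    intro hm d p r hd hp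
    have hmlt : m < flat.length := by omega
    have h1 : ((m + 1 : Nat) : Int) - 1 = (m : Int) := by push_cast; ring
    rw [h1, PySem.List.pyRange_neg_one_cons (by omega), List.foldl_cons]
    have hget : PySem.List.pyGetD flat (m : Int) "" = flat[m] := by
      rw [PySem.List.pyGetD_natCast]
      exact List.getD_eq_getElem flat "" hmlt
    have hdrop : flat.drop m = flat[m] :: flat.drop (m + 1) := (List.getElem_cons_drop (as := flat) (h := hmlt)).symm
    have hprev : (1 : Int) + min p (PySem.Dict.getD d flat[m] (flat.length : Int) - (m : Int) - 1)
        = ((pvTk PySem.Set.empty (flat.drop m)).length : Int) := by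
      rw [hd flat[m], hp, hdrop, pvTk_cons_len]
      push_cast
      omega
    have hstep : pvBStep flat (flat.length : Int) (d, p, r) (m : Int)
        = (PySem.Dict.insert d flat[m] (m : Int),
           ((pvTk PySem.Set.empty (flat.drop m)).length : Int),
           r ++ [((pvTk PySem.Set.empty (flat.drop m)).length : Int)]) := by
      unfold pvBStep
      simp only [hget, hprev]
    rw [hstep, ih (by omega) _ _ _ ?hd' rfl]
    · simp [List.range_succ, List.reverse_append, List.append_assoc]
    case hd' =>
      intro w
      rw [PySem.Dict.getD_insert]
      by_cases hw : w = flat[m]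
      · rw [if_pos hw, hw, hdrop, List.idxOf_cons]
        simp
      · rw [if_neg hw, hd w, hdrop, List.idxOf_cons]
        have hbeq : (flat[m] == w) = false := beq_eq_false_iff_ne.mpr (fun h => hw h.symm)
        rw [hbeq]
        push_cast
        simp only [Bool.cond_false]
        push_cast
        ring

lemma pvNatBeqInt (a b : Nat) : (((a : Nat) : Int) == ((b : Nat) : Int)) = (a == b) := by
  by_cases h : a = b
  · simp [h]
  · simp [h]

lemma pvFoldlMaxLe (c : Int) : ∀ (vals : List (List String)) (a : Nat), (a : Int) ≤ c →
    (∀ t ∈ vals, (t.length : Int) ≤ c) →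
    ((vals.foldl (fun a s => max a s.length) a : Nat) : Int) ≤ c := by
  intro vals
  induction vals with
  | nil => intro a ha _; simpa using ha
  | cons t ts ih =>
    intro a ha hts
    rw [List.foldl_cons]
    refine ih _ ?_ (fun u hu => hts u (List.mem_cons_of_mem _ hu))
    rw [Nat.cast_max]
    exact max_le ha (hts t (List.mem_cons_self))

lemma pvMain (flat : List String) : pvAF flat = pvBF flat := by
  rw [pvA_norm]
  simp only [pvBF, PySem.List.len_eq]
  have hd0 : ∀ w : String, PySem.Dict.getD (PySem.Dict.empty : PySem.Dict String Int) w (flat.length : Int)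
      = ((flat.length : Nat) : Int) + (((flat.drop flat.length).idxOf w : Nat) : Int) := by
    intro w
    rw [PySem.Dict.getD_empty, List.drop_length]
    simp
  have hp0 : (0 : Int) = ((pvTk PySem.Set.empty (flat.drop flat.length)).length : Int) := by
    rw [List.drop_length]
    simp [pvTk]
  simp only [pvB_fold flat flat.length le_rfl PySem.Dict.empty 0 [] hd0 hp0]
  rw [List.nil_append, List.map_reverse, List.reverse_reverse]
  by_cases hn : flat.length = 0
  · simp [hn, pvVals, pvMx]
  · have hn' : 0 < flat.length := Nat.pos_of_ne_zero hn
    have hrne : (List.range flat.length).map (fun i => ((pvTk PySem.Set.empty (flat.drop i)).length : Int)) ≠ [] := by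
      simp [hn]
    rw [if_neg hrne]
    cases hmax : PySem.List.max? ((List.range flat.length).map (fun i => ((pvTk PySem.Set.empty (flat.drop i)).length : Int))) (fun x => x) with
    | none => exact absurd ((PySem.List.max?_eq_none_iff _ _).1 hmax) hrne
    | some M0 =>
      have hub := (PySem.List.le_foldl_max_nat (pvVals flat) List.length 0).2
      have hM0 : M0 = ((pvMx flat : Nat) : Int) := by
        obtain ⟨i0, hi0, hfi0⟩ := by
          have hmem := PySem.List.max?_mem hmax
          simpa only [List.mem_map, List.mem_range] using hmem
        have hle1 : M0 ≤ ((pvMx flat : Nat) : Int) := by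
          rw [← hfi0]
          have : (pvSeqAt flat i0).length ≤ pvMx flat :=
            hub (pvSeqAt flat i0) (by simp only [pvVals, List.mem_map]; exact ⟨i0, by simpa using hi0, rfl⟩)
          unfold pvSeqAt at this
          exact_mod_cast this
        have hle2 : ((pvMx flat : Nat) : Int) ≤ M0 := by
          unfold pvMx
          refine pvFoldlMaxLe M0 (pvVals flat) 0 ?_ ?_
          · rw [← hfi0]; positivity
          · intro t ht
            simp only [pvVals, List.mem_map, List.mem_range] at ht
            obtain ⟨i, hi, rfl⟩ := ht
            refine PySem.List.max?_isMax hmax _ ?_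
            simp only [List.mem_map, List.mem_range]
            exact ⟨i, hi, rfl⟩
        omega
      rw [Option.getD_some, hM0]
      have hmx1 : 1 ≤ pvMx flat := by
        have h1 := hub (pvSeqAt flat 0)
          (by simp only [pvVals, List.mem_map, List.mem_range]; exact ⟨0, hn', rfl⟩)
        have h2 := pvSeqAt_pos flat 0 hn'
        unfold pvMx
        omega
      rw [if_pos (by exact_mod_cast hmx1)]
      refine Prod.ext rfl ?_
      symm
      rw [PySem.List.pyRange_zero_nat, List.filter_map, List.map_map]
      rw [show pvVals flat = (List.range flat.length).map (pvSeqAt flat) from rfl, List.filter_map]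
      rw [List.filter_congr (q := (fun s => s.length == pvMx flat) ∘ pvSeqAt flat) ?hpred]
      · refine List.map_congr_left ?_
        intro i hi
        have hi' := List.mem_filter.1 hi
        have hlen : (pvSeqAt flat i).length = pvMx flat := by
          have h2 := hi'.2
          simpa [Function.comp, beq_iff_eq] using h2
        simp only [Function.comp]
        rw [PySem.List.slice_natCast_add]
        rw [← hlen]
        unfold pvSeqAt
        exact (pvTk_take (flat.drop i) PySem.Set.empty).symm
      case hpred =>
        intro i hi
        have hilt : i < flat.length := List.mem_range.1 hi
        simp only [Function.comp]
        rw [PySem.List.pyGetD_natCast,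
          List.getD_eq_getElem _ _ (by simpa using hilt),
          List.getElem_map]
        rw [show (List.range flat.length)[i]'(by simpa using hilt) = i from by simp]
        unfold pvSeqAt
        exact pvNatBeqInt _ _

-- ===== VERDICT (by name: the statement is the Claim_ definition above) =====
theorem longest_unique_word_sequence_spec : Claim_equal_longest_unique_word_sequence := by
  intro words _
  unfold Spec_longest_unique_word_sequence
  have hA : longest_unique_word_sequence words = pvAF (words.flatMap (fun sublist => sublist)) := rfl
  have hB : longest_unique_word_sequence_alt words = pvBF (words.flatMap (fun sublist => sublist)) := rfl
  rw [hA, hB, pvMain]
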